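-- pv_equiv track=rewrite | github.com/mei28/deep_sort | exp/20220609/utils/visualize.py | get_masked_bboxes
-- ===== SOURCE A (Python) =====
-- def get_masked_bboxes(bboxes: list, target_frame_id: int) -> list:
--     """
--     bboxesの中で対象となるフレームだけ抽出する
--     Args:
--         bboxes (list):矩形情報
--         target_frame_id (int): 対象のフレーム
--     Returns:
--         マスクされた矩形情報
--     """
--     ret: list = []
--     for _bbox in bboxes:
--         _frame_id = int(_bbox[0])
--         if _frame_id == target_frame_id:
--             ret.append(_bbox)
--
--         if _frame_id > target_frame_id:
--             break
--     return ret
-- ===== SOURCE B (Python) =====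
-- def get_masked_bboxes(bboxes: list, target_frame_id: int) -> list:
--     """Compute the scan boundary (first row whose frame id passes the target),
--     then filter the prefix before it by frame id."""
--     stop = next((i for i, b in enumerate(bboxes) if int(b[0]) > target_frame_id),
--                 len(bboxes))
--     return [b for b in bboxes[:stop] if int(b[0]) == target_frame_id]
-- ===== Notes on version B (the rewrite author's own statement) =====
-- stated objective: idiomatic
-- what changed: Replaces A's accumulate-and-break loop by computing the scan boundary (index of the first row whose frame id passes the target, via next/enumerate), slicing the prefix before it and filtering that prefix by frame id.
import Mathlib
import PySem

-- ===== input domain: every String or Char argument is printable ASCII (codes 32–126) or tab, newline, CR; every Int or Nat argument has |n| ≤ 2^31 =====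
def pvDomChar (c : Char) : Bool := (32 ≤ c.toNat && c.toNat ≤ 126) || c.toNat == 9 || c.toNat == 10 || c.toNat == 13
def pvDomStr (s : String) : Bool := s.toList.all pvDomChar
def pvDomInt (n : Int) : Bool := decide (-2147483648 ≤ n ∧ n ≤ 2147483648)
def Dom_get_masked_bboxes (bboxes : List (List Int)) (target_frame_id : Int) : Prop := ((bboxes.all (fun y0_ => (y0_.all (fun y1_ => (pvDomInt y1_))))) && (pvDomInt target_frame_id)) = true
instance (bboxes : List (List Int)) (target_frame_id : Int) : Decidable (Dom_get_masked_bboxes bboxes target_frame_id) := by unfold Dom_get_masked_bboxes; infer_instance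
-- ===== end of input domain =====

-- B replaces A's accumulate-and-break loop by computing the scan boundary (first row whose
-- frame id passes the target), slicing the prefix and filtering it by frame id (idiomatic).

-- `int(_bbox[0])`: the frame id of a row; Pre_ guarantees every row either is nonempty or
-- is never read, so headD's default is never taken
def hd0 (b : List Int) : Int := b.headD 0

-- ===== PORT A =====
-- the for-loop with append and break, as structural recursion
def get_masked_bboxes (bboxes : List (List Int)) (target_frame_id : Int) : List (List Int) :=
  match bboxes with
  | [] => []
  | b :: rest =>
    if hd0 b = target_frame_id then b :: get_masked_bboxes rest target_frame_id
    else if hd0 b > target_frame_id then []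
    else get_masked_bboxes rest target_frame_id

-- ===== PORT B =====
-- Source B's `next((i for i, b in enumerate(bboxes) if int(b[0]) > target_frame_id), len(bboxes))`
def stopIdx (bboxes : List (List Int)) (target_frame_id : Int) : Nat :=
  match bboxes with
  | [] => 0
  | b :: rest => if target_frame_id < hd0 b then 0 else stopIdx rest target_frame_id + 1

def get_masked_bboxes_alt (bboxes : List (List Int)) (target_frame_id : Int) : List (List Int) :=
  let stop := stopIdx bboxes target_frame_id
  (PySem.List.slice bboxes none (some (stop : Int))).filter
    (fun b => decide (hd0 b = target_frame_id))

-- ===== PRECONDITION & SPEC =====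
-- a row at which the scan stops: an empty row (IndexError) or one whose frame id passes the target
def stopRow (target_frame_id : Int) (b : List Int) : Bool :=
  b.isEmpty || b.head?.any (fun h => decide (target_frame_id < h))

-- Pre_ excludes exactly the inputs on which A (and B alike) raises IndexError:
-- an empty row reached before any row whose frame id passes the target.
def Pre_get_masked_bboxes (bboxes : List (List Int)) (target_frame_id : Int) : Prop :=
  ∀ i, i < bboxes.length → (bboxes.getD i []).isEmpty = true →
    ∃ j, j < i ∧ stopRow target_frame_id (bboxes.getD j []) = true
instance (bboxes : List (List Int)) (target_frame_id : Int) : Decidable (Pre_get_masked_bboxes bboxes target_frame_id) := by unfold Pre_get_masked_bboxes; infer_instance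

def pvWitness_get_masked_bboxes : List (List Int) × Int := ([[1, 10], [2, 20], [2, 30], [3, 40]], 2)

def Spec_get_masked_bboxes (bboxes : List (List Int)) (target_frame_id : Int) (out : List (List Int)) : Prop := out = get_masked_bboxes_alt bboxes target_frame_id
instance (bboxes : List (List Int)) (target_frame_id : Int) (out : List (List Int)) : Decidable (Spec_get_masked_bboxes bboxes target_frame_id out) := by unfold Spec_get_masked_bboxes; infer_instance

-- ===== CLAIM (what is proved, stated in full; the proofs are below) =====
def Claim_equal_get_masked_bboxes : Prop := ∀ (bboxes : List (List Int)) (target_frame_id : Int), Dom_get_masked_bboxes bboxes target_frame_id → Pre_get_masked_bboxes bboxes target_frame_id → Spec_get_masked_bboxes bboxes target_frame_id (get_masked_bboxes bboxes target_frame_id)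

-- ===== LEMMAS AND PROOFS =====

-- the ports agree on every input (Pre_ is needed only for the PYTHON claim: both
-- Pythons raise outside it, while the ports are total)
lemma ports_agree (xs : List (List Int)) (t : Int) :
    get_masked_bboxes xs t = get_masked_bboxes_alt xs t := by
  show get_masked_bboxes xs t
      = (PySem.List.slice xs none (some ((stopIdx xs t : Nat) : Int))).filter
          (fun b => decide (hd0 b = t))
  rw [PySem.List.slice_to_natCast]
  induction xs with
  | nil => simp [get_masked_bboxes, stopIdx]
  | cons b r ih =>
    by_cases hgt : t < hd0 b
    · have hne : ¬ hd0 b = t := by omega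
      simp [get_masked_bboxes, stopIdx, hgt, hne]
    · by_cases heq : hd0 b = t
      · simp [get_masked_bboxes, stopIdx, heq, ih]
      · simp [get_masked_bboxes, stopIdx, hgt, heq, ih]

-- ===== VERDICT (by name: the statement is the Claim_ definition above) =====
theorem get_masked_bboxes_spec : Claim_equal_get_masked_bboxes := by
  intro xs t _ _
  exact ports_agree xs t
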